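-- pv_equiv track=rewrite | github.com/helloworld729/40_torch-self-learning | BertSumRBX/src/prepro/data_builder.py | getNewOracle
-- ===== SOURCE A (Python) =====
-- def getNewOracle(oracle_ids, dels):
--     counts = {i: 0 for i in range(len(oracle_ids))}
--     for pos in dels:
--         for i in range(len(oracle_ids)):
--             if oracle_ids[i] > pos:
--                 counts[i] += 1
--     for i, count in counts.items():
--         oracle_ids[i] -= count
--     return oracle_ids
-- ===== SOURCE B (Python) =====
-- def getNewOracle(oracle_ids, dels):
--     # Sort dels once; for each oracle id, the number of deletions strictly
--     # below it is found by binary search (bisect_left, written out since the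
--     # module imports nothing).  Mutates oracle_ids in place like the original.
--     sd = sorted(dels)
--
--     def bisect_left(a, x):
--         lo, hi = 0, len(a)
--         while lo < hi:
--             mid = (lo + hi) // 2
--             if a[mid] < x:
--                 lo = mid + 1
--             else:
--                 hi = mid
--         return lo
--
--     oracle_ids[:] = [v - bisect_left(sd, v) for v in oracle_ids]
--     return oracle_ids
-- ===== Notes on version B (the rewrite author's own statement) =====
-- stated objective: faster
-- what changed: A counts, for every oracle id, the deletions below it with nested loops over dels and positions; B sorts dels once and finds each id's count with a binary search (bisect_left), then maps over the ids.
import Mathlib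
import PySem

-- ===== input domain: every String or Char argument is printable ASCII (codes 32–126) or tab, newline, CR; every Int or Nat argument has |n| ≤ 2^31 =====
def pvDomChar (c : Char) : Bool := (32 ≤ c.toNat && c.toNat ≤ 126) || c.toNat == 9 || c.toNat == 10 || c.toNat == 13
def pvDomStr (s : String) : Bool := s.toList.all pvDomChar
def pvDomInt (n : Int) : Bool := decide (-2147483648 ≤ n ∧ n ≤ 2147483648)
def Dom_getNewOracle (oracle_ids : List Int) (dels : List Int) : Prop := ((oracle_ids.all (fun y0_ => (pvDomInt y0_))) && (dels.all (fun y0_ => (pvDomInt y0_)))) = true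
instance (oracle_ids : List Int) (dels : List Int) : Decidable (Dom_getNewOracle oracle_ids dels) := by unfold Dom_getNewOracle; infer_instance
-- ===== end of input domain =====

-- B replaces A's nested m×n counting loops by one sort of dels plus a binary search per oracle id.
-- Both A and B mutate oracle_ids in place in Python; the theorems are about the returned value
-- (which equals the mutated list in both).


-- ===== PORT A =====
-- counts = {i: 0 for i in range(len(oracle_ids))}; nested loops do counts[i] += 1 when
-- oracle_ids[i] > pos (an always-present key, so += is modify with default 0); the final loop
-- over counts.items() does oracle_ids[i] -= count (read-then-set of position i).
def getNewOracle (oracle_ids : List Int) (dels : List Int) : List Int :=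
  let n : Int := oracle_ids.length
  let counts : PySem.Dict Int Int :=
    (PySem.List.pyRange 0 n 1).foldl (fun d i => d.insert i 0) PySem.Dict.empty
  let counts := dels.foldl (fun d pos =>
    (PySem.List.pyRange 0 n 1).foldl (fun d i =>
      if PySem.List.pyGetD oracle_ids i 0 > pos then d.modify i 0 (· + 1) else d) d) counts
  counts.items.foldl
    (fun lst p => PySem.List.pySetD lst p.1 (PySem.List.pyGetD lst p.1 0 - p.2)) oracle_ids

-- ===== PORT B =====
-- sd = sorted(dels); each id v becomes v - bisect_left(sd, v).  Source B's hand-written bisect_left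
-- is exactly the stdlib bisect_left loop, ported as the prelude primitive PySem.List.bisectLeft.
def getNewOracle_alt (oracle_ids : List Int) (dels : List Int) : List Int :=
  let sd := PySem.List.sorted dels (fun x => x) false
  oracle_ids.map (fun v => v - (PySem.List.bisectLeft sd v : Int))

-- ===== PRECONDITION & SPEC =====
def Spec_getNewOracle (oracle_ids : List Int) (dels : List Int) (out : List Int) : Prop := out = getNewOracle_alt oracle_ids dels
instance (oracle_ids : List Int) (dels : List Int) (out : List Int) : Decidable (Spec_getNewOracle oracle_ids dels out) := by unfold Spec_getNewOracle; infer_instance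

-- ===== CLAIM (what is proved, stated in full; the proofs are below) =====
def Claim_equal_getNewOracle : Prop := ∀ (oracle_ids : List Int) (dels : List Int), Dom_getNewOracle oracle_ids dels → Spec_getNewOracle oracle_ids dels (getNewOracle oracle_ids dels)

-- ===== LEMMAS AND PROOFS =====

-- On a non-decreasing list, bisectLeft x counts the elements strictly below x.
lemma bisectLeft_eq_countP (sd : List Int) (x : Int) (hs : sd.Pairwise (fun a b => a ≤ b)) :
    PySem.List.bisectLeft sd x = sd.countP (fun p => decide (p < x)) := by
  obtain ⟨hle, hlt, hge⟩ := PySem.List.bisectLeft_spec sd x hs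
  set r := PySem.List.bisectLeft sd x with hr
  conv_rhs => rw [← List.take_append_drop r sd]
  rw [List.countP_append]
  have h1 : (sd.take r).countP (fun p => decide (p < x)) = r := by
    have : ∀ a ∈ sd.take r, (fun p => decide (p < x)) a = true := by
      intro a ha
      obtain ⟨j, hj, rfl⟩ := List.mem_take_iff_getElem.mp ha
      simp only [decide_eq_true_iff]
      exact hlt j (by omega) (by omega)
    rw [List.countP_eq_length.mpr this, List.length_take, min_eq_left hle]
  have h2 : (sd.drop r).countP (fun p => decide (p < x)) = 0 := by
    rw [List.countP_eq_zero]
    intro a ha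
    obtain ⟨j, hj, rfl⟩ := List.mem_iff_getElem.mp ha
    have hj' : r + j < sd.length := by
      have := hj; simp [List.length_drop] at this; omega
    rw [List.getElem_drop]
    simp only [decide_eq_true_iff, not_lt]
    exact hge _ hj' (by omega)
  omega

-- Initialisation fold of A: every default-0 lookup is 0.
lemma getD_init (l : List Int) (d : PySem.Dict Int Int) (v : Int) (h : d.getD v 0 = 0) :
    (l.foldl (fun d i => d.insert i 0) d).getD v 0 = 0 := by
  induction l generalizing d with
  | nil => simpa
  | cons a l ih =>
    simp only [List.foldl_cons]
    apply ih
    rw [PySem.Dict.getD_insert]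
    split <;> simp [h]

-- Keys of the initialisation fold of A.
lemma keys_init (l : List Int) :
    (l.foldl (fun (d : PySem.Dict Int Int) i => d.insert i 0) PySem.Dict.empty).keys
      = PySem.Set.ofList l := by
  rw [PySem.Dict.keys_foldl_insert]
  simp [PySem.Set.update, PySem.Set.ofList_eq_foldl, PySem.Dict.keys_empty]

-- Set.update with elements already present is the identity.
lemma set_update_of_subset (s : PySem.Set Int) (l : List Int) (h : ∀ x ∈ l, x ∈ s) :
    PySem.Set.update s l = s := by
  induction l generalizing s with
  | nil => rfl
  | cons a l ih =>
    show (a :: l).foldl PySem.Set.add s = s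
    simp only [List.foldl_cons]
    rw [show PySem.Set.add s a = s from by simp [PySem.Set.add, PySem.Set.contains, h a (by simp)]]
    exact ih s (fun x hx => h x (by simp [hx]))

-- Keys are unchanged by A's counting phase.
lemma keys_count (ids : List Int) (dels : List Int) (d : PySem.Dict Int Int)
    (hk : d.keys = PySem.List.pyRange 0 ids.length 1) :
    (dels.foldl (fun d pos =>
      (PySem.List.pyRange 0 (ids.length : Int) 1).foldl (fun d i =>
        if PySem.List.pyGetD ids i 0 > pos then d.modify i 0 (· + 1) else d) d) d).keys
      = PySem.List.pyRange 0 ids.length 1 := by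
  induction dels generalizing d with
  | nil => simpa
  | cons pos rest ih =>
    simp only [List.foldl_cons]
    apply ih
    rw [PySem.List.foldl_ite_eq_foldl_filter, PySem.Dict.keys_foldl_modify, hk]
    apply set_update_of_subset
    intro x hx
    exact List.mem_of_mem_filter hx

-- Value at key v after A's counting phase: the count of dels strictly below oracle_ids[v].
lemma getD_count (ids : List Int) (dels : List Int) (d : PySem.Dict Int Int) (v : Int)
    (hv : v ∈ PySem.List.pyRange 0 (ids.length : Int) 1) :
    (dels.foldl (fun d pos =>
      (PySem.List.pyRange 0 (ids.length : Int) 1).foldl (fun d i =>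
        if PySem.List.pyGetD ids i 0 > pos then d.modify i 0 (· + 1) else d) d) d).getD v 0
      = d.getD v 0 + (dels.countP (fun pos => decide (pos < PySem.List.pyGetD ids v 0)) : Int) := by
  induction dels generalizing d with
  | nil => simp
  | cons pos rest ih =>
    simp only [List.foldl_cons]
    rw [ih]
    rw [PySem.List.foldl_ite_eq_foldl_filter, PySem.Dict.getD_foldl_modify_add_one,
      List.countP_cons]
    by_cases hc : pos < PySem.List.pyGetD ids v 0
    · rw [List.count_filter (by simpa using hc),
        List.count_eq_one_of_mem (PySem.List.nodup_pyRange_one 0 _) hv]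
      simp only [hc, decide_true, if_pos]
      push_cast; ring
    · rw [List.count_eq_zero.mpr (by simp [List.mem_filter, hc])]
      simp [hc]

-- A's final read-then-set loop over the pairs (i, c i), i = j..n-1.
lemma setfold (ids : List Int) (c : Int → Int) :
    ∀ (m j : Nat) (lst : List Int), j + m = ids.length → lst.length = ids.length →
      lst.drop j = ids.drop j →
      ((PySem.List.pyRange (j : Int) (ids.length : Int) 1).map (fun i => (i, c i))).foldl
          (fun lst (p : Int × Int) =>
            PySem.List.pySetD lst p.1 (PySem.List.pyGetD lst p.1 0 - p.2)) lst
        = lst.take j ++ (PySem.List.pyRange (j : Int) (ids.length : Int) 1).map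
            (fun i => PySem.List.pyGetD ids i 0 - c i) := by
  intro m
  induction m with
  | zero =>
    intro j lst hjm hlen _
    rw [PySem.List.pyRange_one_eq_nil (by omega)]
    simp only [List.map_nil, List.foldl_nil, List.append_nil]
    rw [List.take_of_length_le (by omega)]
  | succ m ih =>
    intro j lst hjm hlen hdrop
    have hj : j < ids.length := by omega
    have hjl : j < lst.length := by omega
    have hcons : PySem.List.pyRange (j : Int) (ids.length : Int) 1
        = (j : Int) :: PySem.List.pyRange ((j : Int) + 1) (ids.length : Int) 1 :=
      PySem.List.pyRange_one_cons (by exact_mod_cast hj)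
    have hgetl : lst[j] = ids[j] := by
      have h0 : (lst.drop j)[0]'(by simp; omega) = (ids.drop j)[0]'(by simp; omega) := by
        simp only [hdrop]
      simpa using h0
    rw [hcons]
    simp only [List.map_cons, List.foldl_cons]
    have hstep : PySem.List.pySetD lst (j : Int)
        (PySem.List.pyGetD lst (j : Int) 0 - c (j : Int))
        = lst.set j (ids[j] - c (j : Int)) := by
      simp [PySem.List.pySetD_natCast, PySem.List.pyGetD_natCast, List.getD_eq_getElem?_getD,
        List.getElem?_eq_getElem hjl, hgetl]
    rw [hstep]
    have hih := ih (j + 1) (lst.set j (ids[j] - c (j : Int))) (by omega) (by simp [hlen])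
      (by
        rw [List.drop_set_of_lt (by omega)]
        have : lst.drop (j + 1) = (lst.drop j).drop 1 := by
          rw [List.drop_drop]
        rw [this, hdrop, List.drop_drop])
    push_cast at hih
    rw [hih]
    have htake : (lst.set j (ids[j] - c (j : Int))).take (j + 1)
        = lst.take j ++ [ids[j] - c (j : Int)] := by
      rw [List.take_add_one, List.take_set_of_le (le_refl j)]
      simp [hjl]
    rw [htake]
    simp [List.getElem?_eq_getElem hj]

-- ===== VERDICT (by name: the statement is the Claim_ definition above) =====
theorem getNewOracle_spec : Claim_equal_getNewOracle := by
  unfold Claim_equal_getNewOracle Spec_getNewOracle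
  intro ids dels _
  unfold getNewOracle getNewOracle_alt
  simp only []
  -- the counting dict after both phases, itemised
  have hkeys0 : ((PySem.List.pyRange 0 (ids.length : Int) 1).foldl
      (fun (d : PySem.Dict Int Int) i => d.insert i 0) PySem.Dict.empty).keys
      = PySem.List.pyRange 0 (ids.length : Int) 1 := by
    rw [keys_init]
    exact PySem.Set.ofList_eq_self_of_nodup _ (PySem.List.nodup_pyRange_one 0 _)
  have hkeysC := keys_count ids dels _ hkeys0
  have hitems : (dels.foldl (fun d pos =>
      (PySem.List.pyRange 0 (ids.length : Int) 1).foldl (fun d i =>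
        if PySem.List.pyGetD ids i 0 > pos then d.modify i 0 (· + 1) else d) d)
      ((PySem.List.pyRange 0 (ids.length : Int) 1).foldl
        (fun (d : PySem.Dict Int Int) i => d.insert i 0) PySem.Dict.empty)).items
      = (PySem.List.pyRange 0 (ids.length : Int) 1).map
          (fun i => (i, (dels.countP (fun pos => decide (pos < PySem.List.pyGetD ids i 0)) : Int))) := by
    rw [PySem.Dict.items_eq_map_keys _ (by rw [hkeysC]; exact PySem.List.nodup_pyRange_one 0 _) 0, hkeysC]
    apply List.map_congr_left
    intro i hi
    rw [getD_count ids dels _ i hi, getD_init _ _ _ (by simp [PySem.Dict.getD_empty])]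
    simp
  rw [hitems]
  have hsf := setfold ids
    (fun i => (dels.countP (fun pos => decide (pos < PySem.List.pyGetD ids i 0)) : Int))
    ids.length 0 ids (by omega) rfl rfl
  push_cast at hsf
  rw [hsf]
  simp only [List.take_zero, List.nil_append]
  -- relate bisectLeft on sorted dels to the countP over dels
  have hb : ∀ v : Int, ((PySem.List.bisectLeft (PySem.List.sorted dels (fun x => x) false) v : Nat) : Int)
      = (dels.countP (fun pos => decide (pos < v)) : Int) := by
    intro v
    rw [bisectLeft_eq_countP _ v (PySem.List.sorted_pairwise dels (fun x => x))]
    exact_mod_cast congrArg Nat.cast ((PySem.List.sorted_perm dels (fun x => x) false).countP_eq _)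
  calc (PySem.List.pyRange 0 (ids.length : Int) 1).map
        (fun i => PySem.List.pyGetD ids i 0
          - (dels.countP (fun pos => decide (pos < PySem.List.pyGetD ids i 0)) : Int))
      = ((PySem.List.pyRange 0 (ids.length : Int) 1).map (fun i => PySem.List.pyGetD ids i 0)).map
          (fun v => v - (dels.countP (fun pos => decide (pos < v)) : Int)) := by
        rw [List.map_map]; simp [Function.comp]
    _ = ids.map (fun v => v - (dels.countP (fun pos => decide (pos < v)) : Int)) := by
        rw [PySem.List.map_pyGetD_pyRange_zero']
    _ = ids.map (fun v => v - (PySem.List.bisectLeft (PySem.List.sorted dels (fun x => x) false) v : Int)) := by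
        apply List.map_congr_left
        intro v _
        rw [hb v]
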